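-- pv_equiv track=rewrite | github.com/amanmukati09/chip_design_deeprl | optimizer/mutations.py | _evaluate_circuit
-- ===== SOURCE A (Python) =====
-- from typing import Tuple, Dict, List, Optional
--
-- Gates = Dict[str, Tuple[str, List[str]]]
--
-- def _eval_gate(gate_type: str, input_vals: List[int]) -> int:
--     """Evaluates one gate given integer input values (0 or 1)."""
--     if gate_type in ('BUFF', 'INPUT'):
--         return input_vals[0]
--     elif gate_type == 'NOT':
--         return 1 - input_vals[0]
--     elif gate_type == 'AND':
--         result = 1
--         for v in input_vals:
--             result &= v
--         return result
--     elif gate_type == 'NAND':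
--         result = 1
--         for v in input_vals:
--             result &= v
--         return 1 - result
--     elif gate_type == 'OR':
--         result = 0
--         for v in input_vals:
--             result |= v
--         return result
--     elif gate_type == 'NOR':
--         result = 0
--         for v in input_vals:
--             result |= v
--         return 1 - result
--     elif gate_type == 'XOR':
--         result = 0
--         for v in input_vals:
--             result ^= v
--         return result
--     elif gate_type == 'XNOR':
--         result = 0
--         for v in input_vals:
--             result ^= v
--         return 1 - result
--     elif gate_type == 'DFF':
--         # DFF is sequential — cannot truth-table it statically.
--         # Return input as-is (transparent latch approximation).
--         return input_vals[0]
--     else: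
--         return 0
--
-- def _evaluate_circuit(inputs: List[str],
--                        outputs: List[str],
--                        gates: Gates,
--                        input_assignment: Dict[str, int]) -> Dict[str, int]:
--     """
--     Evaluates the full circuit for a given input assignment.
--     Returns {signal_name: 0_or_1} for all output signals.
--     Uses topological evaluation (memoized per signal).
--     """
--     memo: Dict[str, int] = {}
--
--     # Seed primary inputs
--     for inp in inputs:
--         memo[inp] = input_assignment.get(inp, 0)
--
--     def evaluate_signal(signal: str) -> int:
--         if signal in memo:
--             return memo[signal]
--         if signal not in gates:
--             # Unknown signal — treat as 0
--             memo[signal] = 0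
--             return 0
--         gate_type, gate_inputs = gates[signal]
--         input_vals = [evaluate_signal(s) for s in gate_inputs]
--         result = _eval_gate(gate_type, input_vals)
--         memo[signal] = result
--         return result
--
--     output_vals = {}
--     for out in outputs:
--         output_vals[out] = evaluate_signal(out)
--     return output_vals
-- ===== SOURCE B (Python) =====
-- from typing import Tuple, Dict, List
--
-- Gates = Dict[str, Tuple[str, List[str]]]
--
-- def _eval_gate(gate_type: str, input_vals: List[int]) -> int:
--     """Evaluates one gate given integer input values (0 or 1)."""
--     if gate_type in ('BUFF', 'INPUT'):
--         return input_vals[0]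
--     elif gate_type == 'NOT':
--         return 1 - input_vals[0]
--     elif gate_type == 'AND':
--         result = 1
--         for v in input_vals:
--             result &= v
--         return result
--     elif gate_type == 'NAND':
--         result = 1
--         for v in input_vals:
--             result &= v
--         return 1 - result
--     elif gate_type == 'OR':
--         result = 0
--         for v in input_vals:
--             result |= v
--         return result
--     elif gate_type == 'NOR':
--         result = 0
--         for v in input_vals:
--             result |= v
--         return 1 - result
--     elif gate_type == 'XOR':
--         result = 0
--         for v in input_vals:
--             result ^= v
--         return result
--     elif gate_type == 'XNOR':
--         result = 0
--         for v in input_vals: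
--             result ^= v
--         return 1 - result
--     elif gate_type == 'DFF':
--         return input_vals[0]
--     else:
--         return 0
--
-- def _evaluate_circuit(inputs: List[str],
--                        outputs: List[str],
--                        gates: Gates,
--                        input_assignment: Dict[str, int]) -> Dict[str, int]:
--     """Pure (memo-free) recursive evaluation of the combinational circuit:
--     every signal's value is a function of the primary inputs alone, so it can
--     simply be recomputed on demand — no memo dictionary, no mutable state."""
--     pi = {inp: input_assignment.get(inp, 0) for inp in inputs}
--
--     def val(s: str) -> int:
--         if s in pi:
--             return pi[s]
--         if s not in gates:
--             return 0
--         gate_type, gate_inputs = gates[s]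
--         return _eval_gate(gate_type, [val(x) for x in gate_inputs])
--
--     return {out: val(out) for out in outputs}
-- ===== Notes on version B (the rewrite author's own statement) =====
-- stated objective: simpler
-- what changed: B drops A's memo dictionary and its stateful inner function entirely: each output is evaluated by a pure side-effect-free recursion over the gate DAG (values are recomputed on demand), instead of A's memoized traversal that threads and mutates a shared memo dict.
import Mathlib
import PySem

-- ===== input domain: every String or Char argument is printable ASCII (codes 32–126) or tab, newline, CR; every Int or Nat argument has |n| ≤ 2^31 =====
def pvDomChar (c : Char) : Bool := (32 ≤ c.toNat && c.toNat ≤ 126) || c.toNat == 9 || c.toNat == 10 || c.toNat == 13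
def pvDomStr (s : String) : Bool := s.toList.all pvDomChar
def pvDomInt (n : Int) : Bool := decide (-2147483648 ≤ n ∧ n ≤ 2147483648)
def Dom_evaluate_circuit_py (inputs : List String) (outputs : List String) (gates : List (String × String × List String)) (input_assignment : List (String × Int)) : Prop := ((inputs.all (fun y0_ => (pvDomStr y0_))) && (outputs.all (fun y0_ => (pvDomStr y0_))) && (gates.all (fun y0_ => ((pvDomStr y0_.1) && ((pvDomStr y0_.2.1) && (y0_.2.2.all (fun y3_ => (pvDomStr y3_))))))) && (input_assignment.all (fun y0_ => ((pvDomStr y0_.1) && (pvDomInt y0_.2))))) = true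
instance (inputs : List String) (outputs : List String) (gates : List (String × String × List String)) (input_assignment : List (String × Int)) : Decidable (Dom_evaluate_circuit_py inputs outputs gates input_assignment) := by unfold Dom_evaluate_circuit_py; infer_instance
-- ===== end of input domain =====

-- B removes A's memo dictionary: a pure recursion recomputes signal values on demand
-- (objective: simpler — no mutable state threaded through the evaluation).

-- ===== PORT A =====

-- _eval_gate, identical helper in both Python files (B keeps it unchanged).
-- input_vals[0] would raise IndexError on an empty list; that is PySem.List.pyGet? = none,
-- such inputs are excluded by Pre_ below, so the .getD 0 fallback is never reached on Pre_.
def pvEvalGate (gate_type : String) (input_vals : List Int) : Int :=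
  if gate_type = "BUFF" ∨ gate_type = "INPUT" then (PySem.List.pyGet? input_vals 0).getD 0
  else if gate_type = "NOT" then 1 - (PySem.List.pyGet? input_vals 0).getD 0
  else if gate_type = "AND" then input_vals.foldl PySem.Int.band 1
  else if gate_type = "NAND" then 1 - input_vals.foldl PySem.Int.band 1
  else if gate_type = "OR" then input_vals.foldl PySem.Int.bor 0
  else if gate_type = "NOR" then 1 - input_vals.foldl PySem.Int.bor 0
  else if gate_type = "XOR" then input_vals.foldl PySem.Int.bxor 0
  else if gate_type = "XNOR" then 1 - input_vals.foldl PySem.Int.bxor 0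
  else if gate_type = "DFF" then (PySem.List.pyGet? input_vals 0).getD 0
  else 0

-- memo seeding loop 'for inp in inputs: memo[inp] = input_assignment.get(inp, 0)'
-- (B's 'pi' dict comprehension builds the very same dict).
def pvSeed (inputs : List String) (input_assignment : List (String × Int)) : PySem.Dict String Int :=
  inputs.foldl (fun m inp => m.insert inp ((PySem.Dict.mk input_assignment).getD inp 0)) PySem.Dict.empty

-- A's recursive evaluate_signal, threading the memo dict; Python's unbounded recursion is
-- modelled with a fuel argument (gates.length + 1 at the top level); fuel never runs out
-- on inputs satisfying Pre_ (where Python A terminates); on cyclic inputs Python raises RecursionError.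
-- 'input_vals = [evaluate_signal(s) for s in gate_inputs]' threads the memo through the comprehension:
def pvEvalArgsA (f : PySem.Dict String Int → String → Int × PySem.Dict String Int) :
    PySem.Dict String Int → List String → List Int × PySem.Dict String Int
  | memo, [] => ([], memo)
  | memo, s :: rest =>
    let r := f memo s
    let q := pvEvalArgsA f r.2 rest
    (r.1 :: q.1, q.2)

def pvEvalSignalA (gates : List (String × String × List String)) :
    Nat → PySem.Dict String Int → String → Int × PySem.Dict String Int
  | 0 => fun memo _ => (0, memo)
  | fuel+1 => fun memo signal =>
    match memo.get? signal with
    | some v => (v, memo)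
    | none =>
      match (PySem.Dict.mk gates).get? signal with
      | none => (0, memo.insert signal 0)
      | some (gt, gins) =>
        let p := pvEvalArgsA (pvEvalSignalA gates fuel) memo gins
        let result := pvEvalGate gt p.1
        (result, p.2.insert signal result)

def evaluate_circuit_py (inputs : List String) (outputs : List String) (gates : List (String × String × List String)) (input_assignment : List (String × Int)) : List (String × Int) :=
  let memo0 := pvSeed inputs input_assignment
  let r := outputs.foldl (fun (acc : PySem.Dict String Int × PySem.Dict String Int) out =>
      let e := pvEvalSignalA gates (gates.length + 1) acc.2 out
      (acc.1.insert out e.1, e.2)) (PySem.Dict.empty, memo0)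
  r.1.items

-- ===== PORT B =====

-- B's pure 'val': no memo, no state; same fuel convention for Python's unbounded recursion.
def pvValB (gates : List (String × String × List String)) (pi : PySem.Dict String Int) :
    Nat → String → Int
  | 0 => fun _ => 0
  | fuel+1 => fun s =>
    match pi.get? s with
    | some v => v
    | none =>
      match (PySem.Dict.mk gates).get? s with
      | none => 0
      | some (gt, gins) => pvEvalGate gt (gins.map (pvValB gates pi fuel))

def evaluate_circuit_py_alt (inputs : List String) (outputs : List String) (gates : List (String × String × List String)) (input_assignment : List (String × Int)) : List (String × Int) :=
  let pi := pvSeed inputs input_assignment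
  (outputs.foldl (fun (d : PySem.Dict String Int) o =>
      d.insert o (pvValB gates pi (gates.length + 1) o)) PySem.Dict.empty).items

-- ===== PRECONDITION & SPEC =====

-- single-input gate types whose evaluation reads input_vals[0] (IndexError when empty)
def pvArityOk (t : String) (ins : List String) : Bool :=
  if t = "BUFF" ∨ t = "INPUT" ∨ t = "NOT" ∨ t = "DFF" then !ins.isEmpty else true

-- pvDone n s: the cone of signal s is a well-formed DAG of depth ≤ n over base signals
-- (primary inputs / unknown names), every gate in it satisfying the arity its type reads.
-- A purely structural graph condition: it computes no signal values.
def pvDone (inputs : List String) (gates : List (String × String × List String)) :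
    Nat → String → Bool
  | 0 => fun s => inputs.contains s || ((PySem.Dict.mk gates).get? s).isNone
  | n+1 => fun s =>
    pvDone inputs gates n s ||
      (match (PySem.Dict.mk gates).get? s with
       | none => false
       | some (t, ins) => pvArityOk t ins && ins.all (pvDone inputs gates n))

-- Pre_ excludes exactly the inputs on which Python A raises: a cyclic dependency reachable
-- from an output (RecursionError) or a reachable BUFF/INPUT/NOT/DFF gate with no inputs
-- (IndexError); any output whose cone is acyclic and arity-correct has depth ≤ gates.length.
def Pre_evaluate_circuit_py (inputs : List String) (outputs : List String) (gates : List (String × String × List String)) (input_assignment : List (String × Int)) : Prop :=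
  ∀ o ∈ outputs, pvDone inputs gates gates.length o = true
instance (inputs : List String) (outputs : List String) (gates : List (String × String × List String)) (input_assignment : List (String × Int)) : Decidable (Pre_evaluate_circuit_py inputs outputs gates input_assignment) := by unfold Pre_evaluate_circuit_py; infer_instance

def pvWitness_evaluate_circuit_py : List String × List String × (List (String × String × List String)) × (List (String × Int)) :=
  (["a", "b"], ["y", "z"], [("y", "NAND", ["a", "b"]), ("z", "NOT", ["y"])], [("a", 1), ("b", 1)])

def Spec_evaluate_circuit_py (inputs : List String) (outputs : List String) (gates : List (String × String × List String)) (input_assignment : List (String × Int)) (out : List (String × Int)) : Prop := out = evaluate_circuit_py_alt inputs outputs gates input_assignment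
instance (inputs : List String) (outputs : List String) (gates : List (String × String × List String)) (input_assignment : List (String × Int)) (out : List (String × Int)) : Decidable (Spec_evaluate_circuit_py inputs outputs gates input_assignment out) := by unfold Spec_evaluate_circuit_py; infer_instance

-- ===== CLAIM (what is proved, stated in full; the proofs are below) =====
def Claim_equal_evaluate_circuit_py : Prop := ∀ (inputs : List String) (outputs : List String) (gates : List (String × String × List String)) (input_assignment : List (String × Int)), Dom_evaluate_circuit_py inputs outputs gates input_assignment → Pre_evaluate_circuit_py inputs outputs gates input_assignment → Spec_evaluate_circuit_py inputs outputs gates input_assignment (evaluate_circuit_py inputs outputs gates input_assignment)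

-- ===== LEMMAS AND PROOFS =====
def pvMono (d d' : PySem.Dict String Int) : Prop :=
  ∀ s v, d.get? s = some v → d'.get? s = some v

def pvInv (inputs : List String) (gates : List (String × String × List String))
    (ia : List (String × Int)) (memo : PySem.Dict String Int) : Prop :=
  pvMono (pvSeed inputs ia) memo ∧
  ∀ s v, memo.get? s = some v →
    v = pvValB gates (pvSeed inputs ia) (gates.length + 1) s

theorem pvSeed_aux (ia : List (String × Int)) (l : List String)
    (m : PySem.Dict String Int) (s : String) :
    ((l.foldl (fun m inp => m.insert inp ((PySem.Dict.mk ia).getD inp 0)) m).get? s).isSome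
      = (decide (s ∈ l) || (m.get? s).isSome) := by
  induction l generalizing m with
  | nil => simp
  | cons x xs ih =>
    simp only [List.foldl_cons, ih, List.mem_cons, PySem.Dict.get?_insert]
    by_cases hx : s = x
    · simp [hx]
    · simp [hx]

theorem pvSeed_isSome (inputs : List String) (ia : List (String × Int)) (s : String) :
    ((pvSeed inputs ia).get? s).isSome = decide (s ∈ inputs) := by
  unfold pvSeed
  rw [pvSeed_aux]
  simp
theorem pvValB_stable (inputs : List String) (gates : List (String × String × List String))
    (ia : List (String × Int)) (n : Nat) :
    ∀ (s : String) (f1 f2 : Nat), pvDone inputs gates n s = true → n < f1 → n < f2 →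
      pvValB gates (pvSeed inputs ia) f1 s = pvValB gates (pvSeed inputs ia) f2 s := by
  induction n with
  | zero =>
    intro s f1 f2 hd h1 h2
    obtain ⟨a, rfl⟩ := Nat.exists_eq_succ_of_ne_zero (Nat.pos_iff_ne_zero.mp h1)
    obtain ⟨b, rfl⟩ := Nat.exists_eq_succ_of_ne_zero (Nat.pos_iff_ne_zero.mp h2)
    simp only [pvValB]
    cases hpi : (pvSeed inputs ia).get? s with
    | some v => rfl
    | none =>
      have hcon : decide (s ∈ inputs) = false := by
        rw [← pvSeed_isSome inputs ia s, hpi]; rfl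
      simp only [pvDone, hcon, List.contains_eq_mem, Bool.false_or] at hd
      cases hg : (PySem.Dict.mk gates).get? s with
      | none => rfl
      | some p => rw [hg] at hd; simp at hd
  | succ n ih =>
    intro s f1 f2 hd h1 h2
    obtain ⟨a, rfl⟩ : ∃ a, f1 = a + 1 := ⟨f1 - 1, by omega⟩
    obtain ⟨b, rfl⟩ : ∃ b, f2 = b + 1 := ⟨f2 - 1, by omega⟩
    simp only [pvDone, Bool.or_eq_true] at hd
    rcases hd with hd | hd
    · exact ih s (a + 1) (b + 1) hd (by omega) (by omega)
    · cases hg : (PySem.Dict.mk gates).get? s with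
      | none => rw [hg] at hd; simp at hd
      | some p =>
        obtain ⟨t, ins⟩ := p
        rw [hg] at hd
        simp only [Bool.and_eq_true, List.all_eq_true] at hd
        obtain ⟨-, hins⟩ := hd
        simp only [pvValB]
        cases hpi : (pvSeed inputs ia).get? s with
        | some v => rfl
        | none =>
          have hmap : ins.map (pvValB gates (pvSeed inputs ia) a)
              = ins.map (pvValB gates (pvSeed inputs ia) b) := by
            apply List.map_congr_left
            intro i hi
            exact ih i a b (hins i hi) (by omega) (by omega)
          rw [hg]; exact congrArg (pvEvalGate t) hmap
theorem pvMono_trans {d1 d2 d3 : PySem.Dict String Int}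
    (h1 : pvMono d1 d2) (h2 : pvMono d2 d3) : pvMono d1 d3 :=
  fun s v h => h2 s v (h1 s v h)

theorem pvPi_none (inputs : List String) (gates : List (String × String × List String))
    (ia : List (String × Int)) (memo : PySem.Dict String Int) (s : String)
    (hinv : pvInv inputs gates ia memo) (hm : memo.get? s = none) :
    (pvSeed inputs ia).get? s = none := by
  cases hpi : (pvSeed inputs ia).get? s with
  | none => rfl
  | some v => rw [hinv.1 s v hpi] at hm; exact absurd hm (by simp)

theorem pvMono_insert_val (inputs : List String) (gates : List (String × String × List String))
    (ia : List (String × Int)) (memo : PySem.Dict String Int) (s : String) (v : Int)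
    (hinv : pvInv inputs gates ia memo)
    (hv : v = pvValB gates (pvSeed inputs ia) (gates.length + 1) s) :
    pvMono memo (memo.insert s v) := by
  intro s' w h
  rw [PySem.Dict.get?_insert]
  split
  · next heq => subst heq; rw [hinv.2 s' w h, ← hv]
  · exact h

theorem pvInv_insert_val (inputs : List String) (gates : List (String × String × List String))
    (ia : List (String × Int)) (memo : PySem.Dict String Int) (s : String) (v : Int)
    (hinv : pvInv inputs gates ia memo)
    (hv : v = pvValB gates (pvSeed inputs ia) (gates.length + 1) s) :
    pvInv inputs gates ia (memo.insert s v) := by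
  refine ⟨pvMono_trans hinv.1 (pvMono_insert_val inputs gates ia memo s v hinv hv), ?_⟩
  intro s' w h
  rw [PySem.Dict.get?_insert] at h
  split at h
  · next heq => subst heq; rw [← Option.some_inj.mp h, hv]
  · exact hinv.2 s' w h

theorem pvEvalA_correct (inputs : List String) (gates : List (String × String × List String))
    (ia : List (String × Int)) (n : Nat) :
    ∀ (s : String) (memo : PySem.Dict String Int) (fuel : Nat),
      pvDone inputs gates n s = true → n < fuel → n ≤ gates.length →
      pvInv inputs gates ia memo →
      (pvEvalSignalA gates fuel memo s).1
          = pvValB gates (pvSeed inputs ia) (gates.length + 1) s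
        ∧ pvInv inputs gates ia (pvEvalSignalA gates fuel memo s).2
        ∧ pvMono memo (pvEvalSignalA gates fuel memo s).2 := by
  induction n with
  | zero =>
    intro s memo fuel hd h1 hlen hinv
    obtain ⟨a, rfl⟩ : ∃ a, fuel = a + 1 := ⟨fuel - 1, by omega⟩
    simp only [pvEvalSignalA]
    cases hm : memo.get? s with
    | some v => exact ⟨hinv.2 s v hm, hinv, fun _ _ h => h⟩
    | none =>
      have hpi := pvPi_none inputs gates ia memo s hinv hm
      have hcon : decide (s ∈ inputs) = false := by
        rw [← pvSeed_isSome inputs ia s, hpi]; rfl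
      simp only [pvDone, hcon, List.contains_eq_mem, Bool.false_or] at hd
      cases hg : (PySem.Dict.mk gates).get? s with
      | some p => rw [hg] at hd; simp at hd
      | none =>
        have hv : (0 : Int) = pvValB gates (pvSeed inputs ia) (gates.length + 1) s := by
          simp only [pvValB, hpi, hg]
        refine ⟨hv, pvInv_insert_val inputs gates ia memo s 0 hinv hv,
          pvMono_insert_val inputs gates ia memo s 0 hinv hv⟩
  | succ n ih =>
    intro s memo fuel hd h1 hlen hinv
    obtain ⟨a, rfl⟩ : ∃ a, fuel = a + 1 := ⟨fuel - 1, by omega⟩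
    simp only [pvDone, Bool.or_eq_true] at hd
    rcases hd with hd | hd
    · exact ih s memo (a + 1) hd (by omega) (by omega) hinv
    · simp only [pvEvalSignalA]
      cases hm : memo.get? s with
      | some v => exact ⟨hinv.2 s v hm, hinv, fun _ _ h => h⟩
      | none =>
        have hpi := pvPi_none inputs gates ia memo s hinv hm
        cases hg : (PySem.Dict.mk gates).get? s with
        | none => rw [hg] at hd; simp at hd
        | some p =>
          obtain ⟨t, ins⟩ := p
          rw [hg] at hd
          simp only [Bool.and_eq_true, List.all_eq_true] at hd
          obtain ⟨-, hins⟩ := hd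
          -- evaluate the argument list, threading the memo
          have argsLem : ∀ (l : List String) (m : PySem.Dict String Int),
              (∀ i ∈ l, pvDone inputs gates n i = true) → pvInv inputs gates ia m →
              (pvEvalArgsA (pvEvalSignalA gates a) m l).1
                  = l.map (pvValB gates (pvSeed inputs ia) (gates.length + 1))
                ∧ pvInv inputs gates ia (pvEvalArgsA (pvEvalSignalA gates a) m l).2
                ∧ pvMono m (pvEvalArgsA (pvEvalSignalA gates a) m l).2 := by
            intro l
            induction l with
            | nil => exact fun m _ hm => ⟨rfl, hm, fun _ _ h => h⟩
            | cons x xs ihl =>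
              intro m hall hm
              have hx := ih x m a (hall x (List.mem_cons_self)) (by omega) (by omega) hm
              have hxs := ihl (pvEvalSignalA gates a m x).2
                (fun i hi => hall i (List.mem_cons_of_mem x hi)) hx.2.1
              refine ⟨?_, hxs.2.1, pvMono_trans hx.2.2 hxs.2.2⟩
              simp only [pvEvalArgsA, List.map_cons, hx.1, hxs.1]
          have hargs := argsLem ins memo hins hinv
          -- the computed gate value is B's value of s
          have hv : pvEvalGate t (pvEvalArgsA (pvEvalSignalA gates a) memo ins).1
              = pvValB gates (pvSeed inputs ia) (gates.length + 1) s := by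
            rw [hargs.1]
            have hstep : pvValB gates (pvSeed inputs ia) (gates.length + 1) s
                = pvEvalGate t (ins.map (pvValB gates (pvSeed inputs ia) gates.length)) := by
              simp only [pvValB, hpi, hg]
            rw [hstep]
            have hmap : ins.map (pvValB gates (pvSeed inputs ia) (gates.length + 1))
                = ins.map (pvValB gates (pvSeed inputs ia) gates.length) := by
              apply List.map_congr_left
              intro i hi
              exact pvValB_stable inputs gates ia n i (gates.length + 1) gates.length
                (hins i hi) (by omega) (by omega)
            rw [hmap]
          exact ⟨hv,
            pvInv_insert_val inputs gates ia _ s _ hargs.2.1 hv,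
            pvMono_trans hargs.2.2 (pvMono_insert_val inputs gates ia _ s _ hargs.2.1 hv)⟩
theorem pvInv_seed (inputs : List String) (gates : List (String × String × List String))
    (ia : List (String × Int)) : pvInv inputs gates ia (pvSeed inputs ia) := by
  refine ⟨fun _ _ h => h, ?_⟩
  intro s v h
  simp only [pvValB, h]

theorem pvFold_eq (inputs : List String) (gates : List (String × String × List String))
    (ia : List (String × Int)) (outs : List String) :
    ∀ (d : PySem.Dict String Int) (memo : PySem.Dict String Int),
      (∀ o ∈ outs, pvDone inputs gates gates.length o = true) →
      pvInv inputs gates ia memo →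
      (outs.foldl (fun (acc : PySem.Dict String Int × PySem.Dict String Int) out =>
          let e := pvEvalSignalA gates (gates.length + 1) acc.2 out
          (acc.1.insert out e.1, e.2)) (d, memo)).1
        = outs.foldl (fun d o =>
            d.insert o (pvValB gates (pvSeed inputs ia) (gates.length + 1) o)) d := by
  induction outs with
  | nil => intro d memo _ _; rfl
  | cons o os ih =>
    intro d memo hall hinv
    have ho := pvEvalA_correct inputs gates ia gates.length o memo (gates.length + 1)
      (hall o (List.mem_cons_self)) (by omega) (by omega) hinv
    simp only [List.foldl_cons, ho.1]
    exact ih (d.insert o (pvValB gates (pvSeed inputs ia) (gates.length + 1) o))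
      (pvEvalSignalA gates (gates.length + 1) memo o).2
      (fun i hi => hall i (List.mem_cons_of_mem o hi)) ho.2.1

-- ===== VERDICT (by name: the statement is the Claim_ definition above) =====
theorem evaluate_circuit_py_spec : Claim_equal_evaluate_circuit_py := by
  intro inputs outputs gates ia _ hpre
  unfold Spec_evaluate_circuit_py evaluate_circuit_py evaluate_circuit_py_alt
  have h := pvFold_eq inputs gates ia outputs PySem.Dict.empty (pvSeed inputs ia)
    hpre (pvInv_seed inputs gates ia)
  simp only at h ⊢
  rw [h]
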